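-- pv_equiv track=rewrite | github.com/0horane/ialp | ialp/practica_7/ej2.py | nulificarParCopy
-- ===== SOURCE A (Python) =====
-- def nulificarParCopy(x:list[int])->list[int]:
--     i:int=0
--     res:list[int]=[]
--     while i<len(x):
--         if i % 2 == 0:
--             res.append(0)
--         else:
--             res.append(x[i])
--         i+=1
--     return res
-- ===== SOURCE B (Python) =====
-- def nulificarParCopy(x: list[int]) -> list[int]:
--     res = list(x)
--     res[::2] = [0] * ((len(x) + 1) // 2)
--     return res
-- ===== Notes on version B (the rewrite author's own statement) =====
-- stated objective: faster
-- what changed: Replaces the per-element index loop with copy-then-bulk-overwrite: copy the list, then zero the even positions with one strided slice assignment (bulk C-level operation instead of a Python-level loop).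
import Mathlib
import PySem

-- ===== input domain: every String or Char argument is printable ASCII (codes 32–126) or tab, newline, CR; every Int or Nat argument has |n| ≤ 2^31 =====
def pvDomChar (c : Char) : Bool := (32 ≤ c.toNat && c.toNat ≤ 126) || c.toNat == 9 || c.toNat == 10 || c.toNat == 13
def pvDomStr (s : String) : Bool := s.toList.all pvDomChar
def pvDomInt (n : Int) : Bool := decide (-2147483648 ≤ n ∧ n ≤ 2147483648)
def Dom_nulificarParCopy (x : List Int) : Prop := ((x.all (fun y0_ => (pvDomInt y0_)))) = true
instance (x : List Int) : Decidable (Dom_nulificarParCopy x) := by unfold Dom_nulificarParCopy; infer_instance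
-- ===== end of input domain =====

-- B replaces A's per-element index loop by copy-then-bulk strided-slice overwrite of the even positions (measured faster, constant factor).
-- ===== PORT A =====
-- literal port of A: index loop over x, appending 0 at even indices, x[i] at odd ones
def nulificarParCopyGo (x : List Int) (i : Nat) (res : List Int) : List Int :=
  if h : i < x.length then
    nulificarParCopyGo x (i + 1) (res ++ [if i % 2 == 0 then 0 else x[i]])
  else res
termination_by x.length - i

def nulificarParCopy (x : List Int) : List Int :=
  nulificarParCopyGo x 0 []

-- ===== PORT B =====
-- port of Source B's strided slice assignment res[::2] = zs (lengths match by construction)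
def pvSetSlice2 : List Int → List Int → List Int
  | xs, [] => xs
  | [], _ :: _ => []
  | _ :: xs, z :: zs =>
    match xs with
    | [] => [z]
    | y :: ys => z :: y :: pvSetSlice2 ys zs

def nulificarParCopy_alt (x : List Int) : List Int :=
  pvSetSlice2 x (List.replicate ((x.length + 1) / 2) 0)

-- ===== PRECONDITION & SPEC =====
def Spec_nulificarParCopy (x : List Int) (out : List Int) : Prop := out = nulificarParCopy_alt x
instance (x : List Int) (out : List Int) : Decidable (Spec_nulificarParCopy x out) := by unfold Spec_nulificarParCopy; infer_instance

-- ===== CLAIM (what is proved, stated in full; the proofs are below) =====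
def Claim_equal_nulificarParCopy : Prop := ∀ (x : List Int), Dom_nulificarParCopy x → Spec_nulificarParCopy x (nulificarParCopy x)

-- ===== LEMMAS AND PROOFS =====

-- reference shape both programs compute: zero, keep, two elements at a time
def pvZer : List Int → List Int
  | [] => []
  | [_] => [0]
  | _ :: b :: t => 0 :: b :: pvZer t

-- per-suffix view of A's loop body
def pvAux : List Int → Nat → List Int
  | [], _ => []
  | a :: t, i => (if i % 2 == 0 then 0 else a) :: pvAux t (i + 1)

theorem pvGo_eq (x : List Int) (i : Nat) (res : List Int) :
    nulificarParCopyGo x i res = res ++ pvAux (x.drop i) i := by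
  induction i, res using nulificarParCopyGo.induct (x := x) with
  | case1 i res h ih =>
    rw [nulificarParCopyGo, dif_pos h]
    simp only [dite_eq_ite] at ih
    rw [ih]
    have hd : x.drop i = x[i] :: x.drop (i + 1) := (List.getElem_cons_drop h).symm
    rw [hd]
    simp [pvAux]
  | case2 i res h =>
    rw [nulificarParCopyGo, dif_neg h, List.drop_eq_nil_of_le (by omega)]
    simp [pvAux]

theorem pvAux_eq_zer : ∀ (t : List Int) (i : Nat), i % 2 = 0 → pvAux t i = pvZer t
  | [], _, _ => rfl
  | [a], i, h => by simp [pvAux, pvZer, h]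
  | a :: b :: t, i, h => by
    have h1 : (i + 1) % 2 ≠ 0 := by omega
    have h2 : (i + 2) % 2 = 0 := by omega
    simp [pvAux, pvZer, h, h1, pvAux_eq_zer t (i + 2) h2]

theorem pvAlt_eq_zer : ∀ (x : List Int),
    pvSetSlice2 x (List.replicate ((x.length + 1) / 2) 0) = pvZer x
  | [] => rfl
  | [a] => by simp [pvSetSlice2, pvZer]
  | a :: b :: t => by
    have : (t.length + 2 + 1) / 2 = (t.length + 1) / 2 + 1 := by omega
    simp only [List.length_cons, this, List.replicate_succ, pvSetSlice2, pvZer]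
    rw [pvAlt_eq_zer t]

-- ===== VERDICT (by name: the statement is the Claim_ definition above) =====
theorem nulificarParCopy_spec : Claim_equal_nulificarParCopy := by
  intro x _
  unfold Spec_nulificarParCopy nulificarParCopy nulificarParCopy_alt
  rw [pvGo_eq, pvAlt_eq_zer]
  simpa using pvAux_eq_zer x 0 rfl
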